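-- pv_equiv track=rewrite | github.com/nikspatel007/priority-lens | src/email_action.py | is_similar_action
-- ===== SOURCE A (Python) =====
-- from typing import Literal, Optional, TYPE_CHECKING
--
-- ActionType = Literal[
--     'reply_now',      # Draft immediate reply
--     'reply_later',    # Flag for later response
--     'forward',        # Forward to someone else
--     'archive',        # No action needed
--     'delete',         # Spam/irrelevant
--     'create_task',    # Convert to task item
-- ]
--
-- def is_similar_action(action1: ActionType, action2: ActionType) -> bool:
--     """Check if two action types are similar (for partial credit).
--
--     Args:
--         action1: First action type
--         action2: Second action type
--
--     Returns:
--         True if actions are similar enough for partial credit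
--     """
--     # Define similarity groups
--     response_actions = {'reply_now', 'reply_later'}
--     passive_actions = {'archive', 'delete'}
--     task_actions = {'create_task', 'reply_later'}  # Both defer work
--
--     for group in [response_actions, passive_actions, task_actions]:
--         if action1 in group and action2 in group:
--             return True
--
--     return False
-- ===== SOURCE B (Python) =====
-- # B: precompute an adjacency dict mapping each action to the set of all actions
-- # sharing a group with it; is_similar_action becomes a single lookup.
-- _GROUPS = (
--     {'reply_now', 'reply_later'},   # response actions
--     {'archive', 'delete'},          # passive actions
--     {'create_task', 'reply_later'}, # task actions (both defer work)
-- )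
--
-- _NEIGHBORS = {}
-- for _group in _GROUPS:
--     for _a in _group:
--         _NEIGHBORS.setdefault(_a, set()).update(_group)
--
-- def is_similar_action(action1, action2):
--     return action2 in _NEIGHBORS.get(action1, set())
-- ===== Notes on version B (the rewrite author's own statement) =====
-- stated objective: alternative
-- what changed: Replaces the per-call scan over the three similarity groups with a module-level adjacency dict built once (each action mapped to the set of its co-group members), so the function body is a single dict lookup plus set membership.
import Mathlib
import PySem

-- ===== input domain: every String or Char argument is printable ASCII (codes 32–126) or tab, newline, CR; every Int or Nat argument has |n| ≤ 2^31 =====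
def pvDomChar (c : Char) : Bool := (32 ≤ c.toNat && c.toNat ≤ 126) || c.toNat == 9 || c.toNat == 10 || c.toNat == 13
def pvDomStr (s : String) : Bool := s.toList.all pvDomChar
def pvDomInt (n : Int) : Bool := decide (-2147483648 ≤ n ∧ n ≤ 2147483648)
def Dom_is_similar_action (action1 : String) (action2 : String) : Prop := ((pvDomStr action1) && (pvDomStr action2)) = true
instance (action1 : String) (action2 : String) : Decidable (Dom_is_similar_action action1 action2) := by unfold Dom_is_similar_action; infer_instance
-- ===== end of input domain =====

-- B replaces the per-call scan over the three similarity groups by a one-time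
-- adjacency dict (action -> set of co-group actions) and a single lookup (alternative decomposition).


-- ===== PORT A =====
-- the for-loop with early return, checking each similarity group in order
def pvLoopA (groups : List (PySem.Set String)) (action1 action2 : String) : Bool :=
  match groups with
  | [] => false
  | g :: rest =>
      if PySem.Set.contains g action1 && PySem.Set.contains g action2 then true
      else pvLoopA rest action1 action2

def is_similar_action (action1 : String) (action2 : String) : Bool :=
  let response_actions : PySem.Set String := PySem.Set.ofList ["reply_now", "reply_later"]
  let passive_actions : PySem.Set String := PySem.Set.ofList ["archive", "delete"]
  let task_actions : PySem.Set String := PySem.Set.ofList ["create_task", "reply_later"]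
  pvLoopA [response_actions, passive_actions, task_actions] action1 action2

-- ===== PORT B =====
-- B's bool result does not depend on Python's set-iteration order, so the group
-- sets are iterated here in literal order.
def pvGroupsB : List (List String) :=
  [["reply_now", "reply_later"], ["archive", "delete"], ["create_task", "reply_later"]]

-- _NEIGHBORS.setdefault(a, set()).update(group), folded over all groups and members
def pvNeighbors : PySem.Dict String (PySem.Set String) :=
  pvGroupsB.foldl
    (fun d g =>
      g.foldl
        (fun d a =>
          PySem.Dict.insert d a
            (PySem.Set.update (PySem.Dict.getD d a PySem.Set.empty) g)) d)
    PySem.Dict.empty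

def is_similar_action_alt (action1 : String) (action2 : String) : Bool :=
  PySem.Set.contains (PySem.Dict.getD pvNeighbors action1 PySem.Set.empty) action2

-- ===== PRECONDITION & SPEC =====
def Spec_is_similar_action (action1 : String) (action2 : String) (out : Bool) : Prop := out = is_similar_action_alt action1 action2
instance (action1 : String) (action2 : String) (out : Bool) : Decidable (Spec_is_similar_action action1 action2 out) := by unfold Spec_is_similar_action; infer_instance

-- ===== CLAIM (what is proved, stated in full; the proofs are below) =====
def Claim_equal_is_similar_action : Prop := ∀ (action1 : String) (action2 : String), Dom_is_similar_action action1 action2 → Spec_is_similar_action action1 action2 (is_similar_action action1 action2)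

-- ===== LEMMAS AND PROOFS =====

-- ===== VERDICT (by name: the statement is the Claim_ definition above) =====
theorem is_similar_action_spec : Claim_equal_is_similar_action := by
  intro a1 a2 _
  unfold Spec_is_similar_action
  have hN : pvNeighbors = PySem.Dict.mk
      [("reply_now", ["reply_now", "reply_later"]),
       ("reply_later", ["reply_now", "reply_later", "create_task"]),
       ("archive", ["archive", "delete"]),
       ("delete", ["archive", "delete"]),
       ("create_task", ["create_task", "reply_later"])] := by decide
  have hg1 : PySem.Set.ofList ["reply_now", "reply_later"] = ["reply_now", "reply_later"] := by decide
  have hg2 : PySem.Set.ofList ["archive", "delete"] = ["archive", "delete"] := by decide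
  have hg3 : PySem.Set.ofList ["create_task", "reply_later"] = ["create_task", "reply_later"] := by decide
  unfold is_similar_action is_similar_action_alt
  rw [hN]
  simp only [hg1, hg2, hg3, pvLoopA, PySem.Dict.getD_eq_get?_getD, PySem.Dict.get?_mk_cons,
    PySem.Set.contains_eq_listContains, PySem.Set.empty, List.contains_cons, List.elem_nil]
  by_cases h1 : a1 = "reply_now" <;>
  by_cases h2 : a1 = "reply_later" <;>
  by_cases h3 : a1 = "archive" <;>
  by_cases h4 : a1 = "delete" <;>
  by_cases h5 : a1 = "create_task" <;>
    simp_all [eq_comm (b := a1)] <;>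
  by_cases k1 : a2 = "reply_now" <;>
  by_cases k2 : a2 = "reply_later" <;>
  by_cases k3 : a2 = "archive" <;>
  by_cases k4 : a2 = "delete" <;>
  by_cases k5 : a2 = "create_task" <;>
    first | rfl | simp_all [PySem.Dict.get?]
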